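-- pv_equiv track=rewrite | github.com/RicardoV2017/Robotics-Code | final.py | most_common_digit
-- ===== SOURCE A (Python) =====
-- def most_common_digit(num):
--   #YOUR CODE HERE
--   if num == 0:
--     return num
--   buckets = [0,0,0,0,0, 0,0,0,0,0]
--   while num > 0:
--     buckets[num % 10] += 1
--     num //= 10
--   return max(range(9,0,-1), key=(lambda x: buckets[x]))
-- ===== SOURCE B (Python) =====
-- def most_common_digit(num):
--   if num == 0:
--     return 0
--   best = best_len = prev = run = 0
--   for d in sorted(map(int, str(abs(num)))):
--     if d == 0:
--       continue
--     run = run + 1 if d == prev else 1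
--     prev = d
--     if run >= best_len:
--       best, best_len = d, run
--   return best
-- ===== Notes on version B (the rewrite author's own statement) =====
-- stated objective: alternative
-- what changed: Replaces A's modular bucket-histogram extraction plus max-with-key argmax over range(9,0,-1) by sorting the decimal digits and scanning runs of equal digits once, keeping the longest (latest, hence largest-digit) run.
-- intended difference: For negative num A's while-loop never runs, so A returns 9 from the all-zero buckets regardless of the digits; B returns the most common digit of |num|, which is the intended value for a digit-frequency function. — e.g. on most_common_digit(-12): A returns 9, B returns 2
import Mathlib
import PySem

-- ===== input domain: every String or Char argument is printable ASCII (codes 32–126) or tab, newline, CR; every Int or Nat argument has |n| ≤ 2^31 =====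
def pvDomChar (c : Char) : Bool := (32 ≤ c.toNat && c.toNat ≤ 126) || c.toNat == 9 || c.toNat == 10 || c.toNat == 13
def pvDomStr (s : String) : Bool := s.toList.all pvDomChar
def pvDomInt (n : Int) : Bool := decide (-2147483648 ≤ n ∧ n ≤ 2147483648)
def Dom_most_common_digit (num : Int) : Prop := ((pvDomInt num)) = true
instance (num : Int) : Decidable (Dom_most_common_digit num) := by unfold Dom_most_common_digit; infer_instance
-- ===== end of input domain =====

-- B sorts the decimal digits of |num| and scans runs of equal digits once, instead of A's
-- modular bucket-histogram loop + max(range(9,0,-1), key=...); for negative input A returns 9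
-- from its never-filled buckets while B returns the most common digit of |num| (see D_ below).


-- ===== PORT A =====
-- the while-loop: buckets[num % 10] += 1; num //= 10   (runs while num > 0)
def mcdLoop (num : Int) (buckets : List Int) : List Int :=
  if h : 0 < num then
    mcdLoop (PySem.Int.floordiv num 10)
      (buckets.set (PySem.Int.mod num 10).toNat
        (PySem.List.pyGetD buckets (PySem.Int.mod num 10) 0 + 1))
  else buckets
termination_by num.toNat
decreasing_by
  simp only [PySem.Int.floordiv]
  rw [Int.fdiv_eq_ediv]
  simp only [Int.zero_le_ofNat, true_or, if_true]
  omega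

def most_common_digit (num : Int) : Int :=
  if num == 0 then num
  else
    -- Python's max over the literal nonempty range(9,0,-1) never raises; .getD 0 is unreachable
    (PySem.List.max? (PySem.List.pyRange 9 0 (-1))
      (fun x => PySem.List.pyGetD (mcdLoop num [0,0,0,0,0, 0,0,0,0,0]) x 0)).getD 0

-- ===== PORT B =====
-- port of int(c) for the decimal digit characters produced by str(...) (exact on digit chars)
def pyDigitVal (c : Char) : Int := (c.toNat : Int) - 48

-- one step of B's loop body; state = (best, best_len, prev, run)
def mcdStep (st : Int × Int × Int × Int) (d : Int) : Int × Int × Int × Int :=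
  if d == 0 then st
  else
    let run := if d == st.2.2.1 then st.2.2.2 + 1 else 1
    if run ≥ st.2.1 then (d, run, d, run) else (st.1, st.2.1, d, run)

def most_common_digit_alt (num : Int) : Int :=
  if num == 0 then 0
  else
    ((PySem.List.sorted
      ((PySem.Int.toStr (if num < 0 then -num else num)).toList.map pyDigitVal)
      (fun x => x) false).foldl mcdStep (0, 0, 0, 0)).1

-- ===== PRECONDITION & SPEC =====
-- For negative num, A's while-loop guard (num > 0) never fires, so A returns 9 from the
-- all-zero buckets regardless of the digits; B returns the most common digit of |num|,
-- which is the intended value for a digit-frequency function.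
def D_most_common_digit (num : Int) : Prop := num < 0
instance (num : Int) : Decidable (D_most_common_digit num) := by unfold D_most_common_digit; infer_instance

def Spec_most_common_digit (num : Int) (out : Int) : Prop := ¬ D_most_common_digit num → out = most_common_digit_alt num
instance (num : Int) (out : Int) : Decidable (Spec_most_common_digit num out) := by unfold Spec_most_common_digit; infer_instance

def pvDiffWitness_most_common_digit : Int := (-12)
def pvDiffWitnessOut_most_common_digit : Int × Int := (9, 2)

-- ===== CLAIM (what is proved, stated in full; the proofs are below) =====
def Claim_unchanged_most_common_digit : Prop := ∀ (num : Int), Dom_most_common_digit num → Spec_most_common_digit num (most_common_digit num)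
def Claim_changed_most_common_digit : Prop := Dom_most_common_digit (pvDiffWitness_most_common_digit) ∧ D_most_common_digit (pvDiffWitness_most_common_digit) ∧ most_common_digit (pvDiffWitness_most_common_digit) = pvDiffWitnessOut_most_common_digit.1 ∧ most_common_digit_alt (pvDiffWitness_most_common_digit) = pvDiffWitnessOut_most_common_digit.2 ∧ pvDiffWitnessOut_most_common_digit.1 ≠ pvDiffWitnessOut_most_common_digit.2

-- ===== LEMMAS AND PROOFS =====

-- little-endian base-10 digit list of a natural number
def digitsL (n : Nat) : List Nat :=
  if h : n = 0 then [] else n % 10 :: digitsL (n / 10)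
decreasing_by omega

theorem digitsL_zero : digitsL 0 = [] := by simp [digitsL]

theorem digitsL_pos {n : Nat} (h : 0 < n) : digitsL n = n % 10 :: digitsL (n / 10) := by
  rw [digitsL]; simp [Nat.pos_iff_ne_zero.mp h]

theorem digitsL_lt (n : Nat) : ∀ d ∈ digitsL n, d < 10 := by
  induction n using Nat.strong_induction_on with
  | _ n ih =>
    by_cases h : n = 0
    · simp [h, digitsL_zero]
    · rw [digitsL_pos (by omega)]
      intro d hd
      rcases List.mem_cons.mp hd with h1 | h1
      · omega
      · exact ih (n / 10) (by omega) d h1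

theorem digitsL_has_nonzero (n : Nat) (h : 0 < n) : ∃ d ∈ digitsL n, d ≠ 0 := by
  induction n using Nat.strong_induction_on with
  | _ n ih =>
    by_cases h10 : n < 10
    · refine ⟨n % 10, ?_, ?_⟩
      · rw [digitsL_pos h]; simp
      · omega
    · obtain ⟨d, hd, hdz⟩ := ih (n / 10) (by omega) (by omega)
      exact ⟨d, by rw [digitsL_pos h]; exact List.mem_cons_of_mem _ hd, hdz⟩

-- the bucket loop is the digit-list fold
theorem mcdLoop_eq (num : Int) (b : List Int) :
    mcdLoop num b
      = (digitsL num.toNat).foldl (fun b d => b.set d (b.getD d 0 + 1)) b := by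
  induction num, b using mcdLoop.induct with
  | case1 num b h ih =>
    have h10 : PySem.Int.mod num 10 = ((num.toNat % 10 : Nat) : Int) := by
      simp only [PySem.Int.mod]
      rw [Int.fmod_eq_emod]
      simp only [Int.zero_le_ofNat, true_or, if_true]
      omega
    have hdivN : (PySem.Int.floordiv num 10).toNat = num.toNat / 10 := by
      simp only [PySem.Int.floordiv]
      rw [Int.fdiv_eq_ediv]
      simp only [Int.zero_le_ofNat, true_or, if_true]
      omega
    rw [mcdLoop, dif_pos h, ih, hdivN, digitsL_pos (show 0 < num.toNat by omega),
      List.foldl_cons, h10, PySem.List.pyGetD_natCast]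
    have hfix : (((num.toNat % 10 : Nat) : Int)).toNat = num.toNat % 10 := by omega
    rw [hfix]
  | case2 num b h =>
    rw [mcdLoop, dif_neg h]
    have hz : num.toNat = 0 := by omega
    rw [hz, digitsL_zero, List.foldl_nil]

theorem foldl_set_getD (l : List Nat) (b : List Int) (i : Nat)
    (hl : ∀ d ∈ l, d < b.length) (hi : i < b.length) :
    (l.foldl (fun b d => b.set d (b.getD d 0 + 1)) b).getD i 0
      = b.getD i 0 + (l.count i : Int) := by
  induction l generalizing b with
  | nil => simp
  | cons x t ih =>
    simp only [List.foldl_cons]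
    rw [ih _ (by intro d hd; simp only [List.length_set]; exact hl d (List.mem_cons_of_mem _ hd))
          (by simpa using hi)]
    by_cases hx : x = i
    · subst hx
      rw [List.getD_eq_getElem?_getD, List.getElem?_set_self (hl x (by simp))]
      simp [List.getD_eq_getElem?_getD]
      ring
    · rw [List.getD_eq_getElem?_getD, List.getElem?_set_ne hx]
      simp [hx, List.getD_eq_getElem?_getD]

-- all-zero bucket list reads 0 everywhere
theorem getD_zeros (i : Nat) : ([0,0,0,0,0, 0,0,0,0,0] : List Int).getD i 0 = 0 := by
  rcases i with _|_|_|_|_|_|_|_|_|_|i <;> simp [List.getD]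

-- ---- str(n): its characters are the digits of n ----

theorem toDigitsCore_eq (fuel : Nat) : ∀ (n : Nat) (acc : List Char),
    0 < n → n ≤ fuel →
    Nat.toDigitsCore 10 fuel n acc = ((digitsL n).map Nat.digitChar).reverse ++ acc := by
  induction fuel with
  | zero => intro n acc h1 h2; omega
  | succ fuel ih =>
    intro n acc h1 h2
    rw [Nat.toDigitsCore]
    by_cases h : n / 10 = 0
    · simp only [h, if_pos]
      rw [digitsL_pos h1]
      have : digitsL (n / 10) = [] := by rw [h, digitsL_zero]
      simp [this]
    · simp only [h]
      rw [ih (n / 10) _ (by omega) (by omega)]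
      rw [digitsL_pos h1]
      simp

theorem toStr_toList (n : Nat) (h : 0 < n) :
    (PySem.Int.toStr (n : Int)).toList = ((digitsL n).map Nat.digitChar).reverse := by
  simp only [PySem.Int.toStr, PySem.Int.toChars]
  rw [if_neg (by omega)]
  have : ((n : Int)).toNat = n := by omega
  rw [this, Nat.toDigits, toDigitsCore_eq (n + 1) n [] h (by omega)]
  rw [String.toList_ofList]
  simp

theorem pyDigitVal_digitChar (d : Nat) (h : d < 10) :
    pyDigitVal (Nat.digitChar d) = (d : Int) := by
  interval_cases d <;> rfl

-- ---- the descending argmax fold (shared characterisation for both sides) ----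

def pickStep (k : Int → Int) (b d : Int) : Int := if k b < k d then d else b

def pick (k : Int → Int) : Int := ([8,7,6,5,4,3,2,1] : List Int).foldl (pickStep k) 9

def mstep (k : Int → Int) (acc : Option Int) (x : Int) : Option Int :=
  match acc with
  | none => some x
  | some m => if k m < k x then some x else some m

theorem max?_eq_foldl_mstep (k : Int → Int) (l : List Int) :
    PySem.List.max? l k = l.foldl (mstep k) none := by
  unfold PySem.List.max?
  congr 1
  funext acc x
  cases acc <;> rfl

theorem foldl_mstep_some (k : Int → Int) (l : List Int) : ∀ a : Int,
    l.foldl (mstep k) (some a) = some (l.foldl (pickStep k) a) := by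
  induction l with
  | nil => intro a; rfl
  | cons x t ih =>
    intro a
    have : mstep k (some a) x = some (pickStep k a x) := by
      show (if k a < k x then some x else some a) = some (if k a < k x then x else a)
      split_ifs <;> rfl
    simp only [List.foldl_cons, this, ih]

theorem desc_fold (k : Int → Int) : ∀ (l : List Int) (a : Int),
    (∀ y ∈ l, y < a) → l.Pairwise (fun x y => y < x) →
    (l.foldl (pickStep k) a ∈ a :: l)
    ∧ (l.foldl (pickStep k) a = a ∨ k a < k (l.foldl (pickStep k) a))
    ∧ (∀ x ∈ a :: l, k x ≤ k (l.foldl (pickStep k) a))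
    ∧ (∀ x ∈ a :: l, l.foldl (pickStep k) a < x → k x < k (l.foldl (pickStep k) a)) := by
  intro l
  induction l with
  | nil =>
    intro a _ _
    refine ⟨by simp, Or.inl rfl, ?_, ?_⟩
    · intro x hx; simp at hx; subst hx; exact le_refl _
    · intro x hx hlt; simp at hx; subst hx; exact absurd hlt (lt_irrefl _)
  | cons x t ih =>
    intro a hlt hpw
    have hxa : x < a := hlt x (by simp)
    have hta : ∀ y ∈ t, y < a := fun y hy => hlt y (List.mem_cons_of_mem _ hy)
    have htx : ∀ y ∈ t, y < x := fun y hy => (List.pairwise_cons.mp hpw).1 y hy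
    have hpt : t.Pairwise (fun x y => y < x) := (List.pairwise_cons.mp hpw).2
    set a' := pickStep k a x with ha'
    have ha'cases : a' = x ∨ a' = a := by
      unfold pickStep at ha'; split_ifs at ha' <;> simp [ha']
    have hta' : ∀ y ∈ t, y < a' := by
      intro y hy; rcases ha'cases with h | h <;> rw [h]
      · exact htx y hy
      · exact hta y hy
    obtain ⟨ihmem, ihinit, ihmax, ihstr⟩ := ih a' hta' hpt
    have hfold : (x :: t).foldl (pickStep k) a = t.foldl (pickStep k) a' := by
      simp [List.foldl_cons, ha']
    set r := t.foldl (pickStep k) a' with hr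
    have hka' : k a ≤ k a' ∧ k x ≤ k a' := by
      unfold pickStep at ha'
      split_ifs at ha' with hc
      · rw [ha']; exact ⟨le_of_lt hc, le_refl _⟩
      · rw [ha']; exact ⟨le_refl _, le_of_not_gt hc⟩
    have hka'r : k a' ≤ k r := ihmax a' (by simp)
    rw [hfold]
    refine ⟨?_, ?_, ?_, ?_⟩
    · -- membership
      rcases List.mem_cons.mp ihmem with h | h
      · rw [h]; rcases ha'cases with h2 | h2 <;> rw [h2] <;> simp
      · simp [h]
    · -- r = a ∨ k a < k r
      rcases ha'cases with h | h
      · right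
        have : k a < k x := by
          by_contra hc
          have : a' = a := by unfold pickStep at ha'; rw [if_neg hc] at ha'; exact ha'
          omega
        exact lt_of_lt_of_le this (le_trans hka'.2 hka'r)
      · rcases ihinit with h2 | h2
        · left; rw [h2, h]
        · right; rw [h] at h2; exact h2
    · -- max
      intro y hy
      rcases List.mem_cons.mp hy with h | h
      · subst h; exact le_trans hka'.1 hka'r
      · rcases List.mem_cons.mp h with h2 | h2
        · subst h2; exact le_trans hka'.2 hka'r
        · exact ihmax y (List.mem_cons_of_mem _ h2)
    · -- strict above r
      intro y hy hry
      rcases List.mem_cons.mp hy with h | h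
      · -- y = a
        rw [h] at hry ⊢
        rcases ha'cases with h2 | h2
        · -- a' = x : r ∈ x::t, all < a, so k a < k r was needed; show k a < k x ≤ k r
          have hkax : k a < k x := by
            by_contra hc
            have : a' = a := by unfold pickStep at ha'; rw [if_neg hc] at ha'; exact ha'
            omega
          exact lt_of_lt_of_le hkax (le_trans hka'.2 hka'r)
        · -- a' = a: r = a ∨ k a < k r; r < a rules out r = a
          rcases ihinit with h3 | h3
          · rw [h3, h2] at hry; exact absurd hry (lt_irrefl _)
          · rw [h2] at h3; exact h3
      · rcases List.mem_cons.mp h with h2 | h2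
        · -- y = x
          subst h2
          rcases ha'cases with h3 | h3
          · exact ihstr y (by rw [h3]; simp) hry
          · -- a' = a, so k x ≤ k a; and r = a impossible (r < x < a)
            rcases ihinit with h4 | h4
            · rw [h4, h3] at hry; exact absurd (lt_trans hry hxa) (lt_irrefl _)
            · rw [h3] at h4
              have hxka : k y ≤ k a := by
                unfold pickStep at ha'
                split_ifs at ha' with hc
                · rw [ha'] at h3
                  exact absurd h3 (by intro he; rw [he] at hxa; exact lt_irrefl _ hxa)
                · exact le_of_not_gt hc
              exact lt_of_le_of_lt hxka h4
        · exact ihstr y (List.mem_cons_of_mem _ h2) hry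

theorem mem_nine_iff (x : Int) : x ∈ ((9 : Int) :: [8,7,6,5,4,3,2,1]) ↔ 1 ≤ x ∧ x ≤ 9 := by
  simp only [List.mem_cons, List.not_mem_nil, or_false]
  constructor
  · rintro (h|h|h|h|h|h|h|h|h) <;> subst h <;> norm_num
  · rintro ⟨h1, h2⟩; omega

theorem pick_prop (k : Int → Int) :
    (1 ≤ pick k ∧ pick k ≤ 9)
    ∧ (∀ e, 1 ≤ e → e ≤ 9 → k e ≤ k (pick k))
    ∧ (∀ e, pick k < e → e ≤ 9 → k e < k (pick k)) := by
  obtain ⟨hmem, -, hmax, hstr⟩ := desc_fold k [8,7,6,5,4,3,2,1] 9 (by decide) (by decide)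
  unfold pick
  have hb := (mem_nine_iff _).mp hmem
  refine ⟨hb, ?_, ?_⟩
  · intro e h1 h2; exact hmax e ((mem_nine_iff e).mpr ⟨h1, h2⟩)
  · intro e h1 h2
    exact hstr e ((mem_nine_iff e).mpr ⟨by omega, h2⟩) h1

theorem pick_eq_of_pred (k : Int → Int) (d : Int) (h1 : 1 ≤ d) (h9 : d ≤ 9)
    (hmax : ∀ e, 1 ≤ e → e ≤ 9 → k e ≤ k d)
    (hstr : ∀ e, d < e → e ≤ 9 → k e < k d) : pick k = d := by
  obtain ⟨⟨hp1, hp9⟩, pmax, pstr⟩ := pick_prop k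
  rcases lt_trichotomy (pick k) d with h | h | h
  · have h2 := pstr d h h9
    have h3 := hmax (pick k) hp1 hp9
    omega
  · exact h
  · have h2 := hstr (pick k) h hp9
    have h3 := pmax d h1 h9
    omega

theorem pick_congr (k k' : Int → Int) (h : ∀ e, 1 ≤ e → e ≤ 9 → k e = k' e) :
    pick k = pick k' := by
  obtain ⟨⟨hp1, hp9⟩, pmax, pstr⟩ := pick_prop k
  refine (pick_eq_of_pred k' (pick k) hp1 hp9 ?_ ?_).symm
  · intro e h1 h9
    rw [← h e h1 h9, ← h (pick k) hp1 hp9]; exact pmax e h1 h9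
  · intro e hd h9
    rw [← h e (by omega) h9, ← h (pick k) hp1 hp9]; exact pstr e hd h9

-- ---- B's run scan over a sorted digit list ----

def kcnt (P : List Int) : Int → Int := fun e => (P.count e : Int)

def lastD (P : List Int) : Int := P.getLast?.getD 0

theorem kcnt_apply (P : List Int) (e : Int) : kcnt P e = (P.count e : Int) := rfl

def stateOf (P : List Int) : Int × Int × Int × Int :=
  (if P.isEmpty then 0 else pick (kcnt P),
   (P.count (pick (kcnt P)) : Int), lastD P, (P.count (lastD P) : Int))

theorem lastD_of_max (P : List Int) (x : Int) (hs : P.Pairwise (· ≤ ·))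
    (hmem : x ∈ P) (hmax : ∀ y ∈ P, y ≤ x) : lastD P = x := by
  rcases List.eq_nil_or_concat P with h | ⟨Q, z, h⟩
  · subst h; simp at hmem
  · subst h
    rw [List.concat_eq_append] at hs hmem hmax ⊢
    have hlast : lastD (Q ++ [z]) = z := by
      unfold lastD; rw [List.getLast?_concat]; rfl
    rw [hlast]
    have hzx : z ≤ x := hmax z (by simp)
    rcases List.mem_append.mp hmem with h2 | h2
    · have hxz : x ≤ z := by
        have := List.pairwise_append.mp hs
        exact this.2.2 x h2 z (by simp)
      omega
    · simp at h2; omega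

theorem step_state (P : List Int) (x : Int)
    (hs : P.Pairwise (· ≤ ·)) (hP : ∀ y ∈ P, 1 ≤ y ∧ y ≤ 9)
    (hx1 : 1 ≤ x) (hx9 : x ≤ 9) (hle : ∀ y ∈ P, y ≤ x) :
    mcdStep (stateOf P) x = stateOf (P ++ [x]) := by
  have hx0 : ¬ (x == 0) = true := by simp; omega
  have hlast' : lastD (P ++ [x]) = x := by
    unfold lastD; rw [List.getLast?_concat]; rfl
  have hcnt : ∀ e : Int, (P ++ [x]).count e = P.count e + (if x = e then 1 else 0) := by
    intro e; rw [List.count_append]; simp [List.count_singleton, beq_iff_eq]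
  have hcx : (P ++ [x]).count x = P.count x + 1 := by rw [hcnt]; simp
  obtain ⟨⟨hpk1, hpk9⟩, hpmax, hpstr⟩ := pick_prop (kcnt P)
  -- the incremented run equals the new count of x
  have hrun : (if (x == lastD P) = true then ((P.count (lastD P) : Int)) + 1 else 1)
      = ((P ++ [x]).count x : Int) := by
    by_cases hxl : x = lastD P
    · rw [if_pos (by simp [hxl]), hcx, ← hxl]; push_cast; ring
    · rw [if_neg (by simp [hxl])]
      have hnotmem : x ∉ P := fun hm => hxl (lastD_of_max P x hs hm hle).symm
      rw [hcx, List.count_eq_zero_of_not_mem hnotmem]; norm_num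
  unfold mcdStep stateOf
  simp only [hx0, if_false, Bool.false_eq_true]
  rw [hrun]
  have hne : (P ++ [x]).isEmpty = false := by simp
  by_cases hcase : ((P ++ [x]).count x : Int) ≥ ((P.count (pick (kcnt P)) : Int))
  · -- update: new best is x
    have hpickx : pick (kcnt (P ++ [x])) = x := by
      apply pick_eq_of_pred _ _ hx1 hx9
      · intro e h1 h9
        simp only [kcnt_apply]
        rw [hcnt e]
        by_cases hex : x = e
        · rw [if_pos hex, ← hex, hcx]
        · rw [if_neg hex]
          have h2 := hpmax e h1 h9
          simp only [kcnt_apply] at h2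
          push_cast at h2 hcase ⊢
          omega
      · intro e hlt h9
        simp only [kcnt_apply]
        have hnm : e ∉ P := fun hm => by have := hle e hm; omega
        rw [hcnt e, if_neg (by omega), List.count_eq_zero_of_not_mem hnm, hcx]
        push_cast; omega
    rw [if_pos hcase, hne]
    simp only [Bool.false_eq_true, if_false]
    rw [hpickx, hlast']
  · -- keep: best unchanged
    have hPne : P ≠ [] := by intro h; subst h; simp at hcase
    have hnotE : P.isEmpty = false := by simpa [List.isEmpty_iff] using hPne
    have hp0x : pick (kcnt P) ≠ x := by
      intro h
      rw [hcx, ← h] at hcase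
      push_cast at hcase
      omega
    have hpickk : pick (kcnt (P ++ [x])) = pick (kcnt P) := by
      apply pick_eq_of_pred _ _ hpk1 hpk9
      · intro e h1 h9
        simp only [kcnt_apply]
        rw [hcnt e, hcnt (pick (kcnt P))]
        rw [if_neg (show ¬ x = pick (kcnt P) from fun hh => hp0x hh.symm)]
        by_cases hex : x = e
        · rw [if_pos hex, ← hex]
          rw [hcx] at hcase
          push_cast at hcase ⊢
          omega
        · rw [if_neg hex]
          have h2 := hpmax e h1 h9
          simp only [kcnt_apply] at h2
          push_cast at h2 ⊢
          omega
      · intro e hlt h9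
        simp only [kcnt_apply]
        rw [hcnt e, hcnt (pick (kcnt P))]
        rw [if_neg (show ¬ x = pick (kcnt P) from fun hh => hp0x hh.symm)]
        by_cases hex : x = e
        · rw [if_pos hex, ← hex]
          rw [hcx] at hcase
          push_cast at hcase ⊢
          omega
        · rw [if_neg hex]
          have h2 := hpstr e hlt h9
          simp only [kcnt_apply] at h2
          push_cast at h2 ⊢
          omega
    rw [if_neg hcase, hnotE, hne]
    simp only [Bool.false_eq_true, if_false]
    rw [hpickk, hlast', hcnt (pick (kcnt P)), if_neg (fun hh => hp0x hh.symm)]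
    simp

theorem fold_state : ∀ (l P : List Int), (P ++ l).Pairwise (· ≤ ·) →
    (∀ y ∈ P ++ l, 1 ≤ y ∧ y ≤ 9) →
    l.foldl mcdStep (stateOf P) = stateOf (P ++ l) := by
  intro l
  induction l with
  | nil => intro P _ _; simp
  | cons x t ih =>
    intro P hs hb
    have hassoc : P ++ x :: t = (P ++ [x]) ++ t := by simp
    have hsplit := List.pairwise_append.mp hs
    have hsx := List.pairwise_cons.mp hsplit.2.1
    have hstep : mcdStep (stateOf P) x = stateOf (P ++ [x]) := by
      apply step_state P x hsplit.1 (fun y hy => hb y (List.mem_append_left _ hy))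
        (hb x (by simp)).1 (hb x (by simp)).2
      intro y hy; exact hsplit.2.2 y hy x (by simp)
    simp only [List.foldl_cons, hstep]
    rw [ih (P ++ [x]) (by rw [← hassoc]; exact hs) (by rw [← hassoc]; exact hb)]
    rw [← hassoc]

-- zeros are skipped by the loop body
theorem foldl_mcdStep_filter : ∀ (l : List Int) (st : Int × Int × Int × Int),
    l.foldl mcdStep st = (l.filter (fun d => !(d == 0))).foldl mcdStep st := by
  intro l
  induction l with
  | nil => intro st; rfl
  | cons x t ih =>
    intro st
    by_cases hx : x = 0
    · subst hx
      simp only [List.foldl_cons, List.filter_cons]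
      have : mcdStep st 0 = st := by unfold mcdStep; simp
      rw [this]
      simpa using ih st
    · simp only [List.foldl_cons, List.filter_cons]
      rw [if_pos (by simp [hx])]
      simp only [List.foldl_cons]
      exact ih _

-- ===== VERDICT (by name: the statement is the Claim_ definition above) =====
theorem most_common_digit_spec : Claim_unchanged_most_common_digit := by
  intro num _
  intro hD
  unfold D_most_common_digit at hD
  unfold most_common_digit most_common_digit_alt
  by_cases h0 : num = 0
  · simp [h0]
  · rw [if_neg (by simpa using h0), if_neg (by simpa using h0)]
    have hpos : 0 < num := by omega
    set n := num.toNat with hn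
    have hnpos : 0 < n := by omega
    -- B's digit list
    have habs : (if num < 0 then -num else num) = ((n : Nat) : Int) := by
      rw [if_neg (by omega)]; omega
    have hmap : ((PySem.Int.toStr (if num < 0 then -num else num)).toList.map pyDigitVal)
        = ((digitsL n).map Int.ofNat).reverse := by
      rw [habs, toStr_toList n hnpos]
      simp only [← List.map_reverse, List.map_map]
      apply List.map_congr_left
      intro d hd
      exact pyDigitVal_digitChar d (digitsL_lt n d (List.mem_reverse.mp hd))
    set L0 := PySem.List.sorted
      ((PySem.Int.toStr (if num < 0 then -num else num)).toList.map pyDigitVal)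
      (fun x => x) false with hL0
    have hperm : L0.Perm (((digitsL n).map Int.ofNat).reverse) := by
      rw [hL0, hmap]; exact PySem.List.sorted_perm _ _ _
    have hsorted : L0.Pairwise (fun a b => a ≤ b) := PySem.List.sorted_pairwise _ _
    set L := L0.filter (fun d => !(d == 0)) with hL
    have hLsorted : L.Pairwise (· ≤ ·) := List.Pairwise.filter _ hsorted
    have hLmem : ∀ y ∈ L, 1 ≤ y ∧ y ≤ 9 := by
      intro y hy
      have h1 := List.of_mem_filter hy
      have h2 : y ∈ L0 := List.mem_of_mem_filter hy
      have h3 := hperm.mem_iff.mp h2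
      simp only [List.mem_reverse, List.mem_map] at h3
      obtain ⟨d, hd, hde⟩ := h3
      have := digitsL_lt n d hd
      have hy0 : y ≠ 0 := by simpa using h1
      have hdy : ((d : Nat) : Int) = y := by exact_mod_cast hde
      omega
    -- counts in L are the digit counts
    have hcount : ∀ e : Int, 1 ≤ e → e ≤ 9 →
        (L.count e : Int) = ((digitsL n).count e.toNat : Int) := by
      intro e h1 h9
      have hc1 : L.count e = L0.count e := by
        rw [hL, List.count_filter]
        have he0 : (!(e == 0)) = true := by simp; omega
        simp [he0]
      have hc2 : L0.count e = (((digitsL n).map Int.ofNat).reverse).count e :=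
        hperm.count_eq e
      have hc3 : ((((digitsL n).map Int.ofNat).reverse).count e : Int)
          = ((digitsL n).count e.toNat : Int) := by
        rw [List.count_reverse]
        conv_lhs => rw [show e = Int.ofNat e.toNat by rw [Int.ofNat_eq_natCast]; omega]
        rw [List.count_map_of_injective _ _ (fun a b hab => Int.ofNat.inj hab)]
      rw [hc1, hc2, hc3]
    -- B's fold
    have hBfold : (L0.foldl mcdStep (0, 0, 0, 0)).1 = pick (kcnt L) := by
      rw [foldl_mcdStep_filter, ← hL]
      have hinit : (0, 0, 0, 0) = stateOf ([] : List Int) := by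
        unfold stateOf lastD kcnt; simp
      rw [hinit, fold_state L [] (by simpa using hLsorted) (by simpa using hLmem)]
      simp only [List.nil_append]
      have hLne : L ≠ [] := by
        obtain ⟨d, hd, hdz⟩ := digitsL_has_nonzero n hnpos
        have hdm : ((d : Nat) : Int) ∈ L := by
          rw [hL]
          apply List.mem_filter_of_mem
          · refine hperm.mem_iff.mpr (List.mem_reverse.mpr (List.mem_map.mpr ⟨d, hd, ?_⟩))
            rw [Int.ofNat_eq_natCast]
          · simp; omega
        intro h; rw [h] at hdm; simp at hdm
      unfold stateOf
      rw [if_neg (by simpa [List.isEmpty_iff] using hLne)]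
    -- A's fold
    have hA : (PySem.List.max? (PySem.List.pyRange 9 0 (-1))
        (fun x => PySem.List.pyGetD (mcdLoop num [0,0,0,0,0, 0,0,0,0,0]) x 0)).getD 0
        = pick (fun x => PySem.List.pyGetD (mcdLoop num [0,0,0,0,0, 0,0,0,0,0]) x 0) := by
      have hr : PySem.List.pyRange 9 0 (-1) = ((9 : Int) :: [8,7,6,5,4,3,2,1]) := by decide
      rw [max?_eq_foldl_mstep, hr, List.foldl_cons]
      have hm9 : mstep (fun x => PySem.List.pyGetD (mcdLoop num [0,0,0,0,0, 0,0,0,0,0]) x 0)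
          none 9 = some (9 : Int) := rfl
      rw [hm9, foldl_mstep_some, Option.getD_some]
      unfold pick
      rfl
    have hkeyA : ∀ e : Int, 1 ≤ e → e ≤ 9 →
        PySem.List.pyGetD (mcdLoop num [0,0,0,0,0, 0,0,0,0,0]) e 0
          = ((digitsL n).count e.toNat : Int) := by
      intro e h1 h9
      have he : e = ((e.toNat : Nat) : Int) := by omega
      rw [he, PySem.List.pyGetD_natCast, mcdLoop_eq]
      rw [foldl_set_getD _ _ _
        (by intro d hd
            have h10 := digitsL_lt num.toNat d hd
            simp only [List.length_cons, List.length_nil]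
            omega)
        (by simp only [List.length_cons, List.length_nil]; omega)]
      rw [getD_zeros, Int.toNat_natCast]
      norm_num
      rfl
    rw [hA]
    rw [pick_congr _ (kcnt L) (by
      intro e h1 h9
      rw [hkeyA e h1 h9]
      unfold kcnt
      rw [hcount e h1 h9])]
    exact hBfold.symm

theorem most_common_digit_changed : Claim_changed_most_common_digit := by
  unfold Claim_changed_most_common_digit
  refine ⟨by decide, by decide, ?_, by decide, by decide⟩
  show most_common_digit (-12) = 9
  unfold most_common_digit
  rw [if_neg (by decide), mcdLoop, dif_neg (by decide)]
  decide
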